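-- pv_equiv track=rewrite | github.com/noblematt/noblematt.github.io | wc-2026-draw/lib/usadraw.py | groups_are_illegal
-- ===== SOURCE A (Python) =====
-- def groups_are_illegal(groups):
--     """
--     Return True iff some constraint has been broken that means the rest of the
--     teams cannot legally be drawn
--     """
--     # Flag groups as illegal if there are no groups for either one of the
--     # intercontinental playoff winners to enter, after pot 3
--     if all(any(c in group[:3] for c in "NAS") for group in groups):
--         return True
--     if all(any(c in group[:3] for c in "NOF") for group in groups):
--         return True
--
--     # Flag groups as illegal if there are fewer than three remaining groups
--     # with space for an African team; noting that if 3 pots are drawn and a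
--     # group has no European team, then an African team cannot be drawn there as
--     # a European team is required in each group
--     if all(len(g) == 3 for g in groups):
--         african_allowed_count = sum(
--             any(c in g for c in "DE") and not "F" in g for g in groups
--         )
--         if african_allowed_count < 3:
--             return True
--
--         # And the same for Asian teams
--         asian_allowed_count = sum(
--             any(c in g for c in "DE") and not "A" in g for g in groups
--         )
--         if asian_allowed_count < 2:
--             return True
--
--         # Ensure there is enough space for both of the above (in case of one
--         # group counting for both)
--         african_or_asian_allowed_count = sum(
--             any(c in g for c in "DE") and not all(c in g for c in "AF") for g in groups
--         )
--         if african_or_asian_allowed_count < 5: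
--             return True
--
--     return False
-- ===== SOURCE B (Python) =====
-- def groups_are_illegal(groups):
--     # Single pass: accumulate all flags/counters in one loop over groups,
--     # sharing the prefix slice and the 'D' or 'E' membership per group.
--     nas_all = nof_all = all_three = True
--     african = asian = either = 0
--     for g in groups:
--         prefix = g[:3]
--         nas_all = nas_all and ('N' in prefix or 'A' in prefix or 'S' in prefix)
--         nof_all = nof_all and ('N' in prefix or 'O' in prefix or 'F' in prefix)
--         all_three = all_three and len(g) == 3
--         de = 'D' in g or 'E' in g
--         if de and 'F' not in g:
--             african += 1
--         if de and 'A' not in g: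
--             asian += 1
--         if de and not ('A' in g and 'F' in g):
--             either += 1
--     if nas_all:
--         return True
--     if nof_all:
--         return True
--     if all_three:
--         if african < 3:
--             return True
--         if asian < 2:
--             return True
--         if either < 5:
--             return True
--     return False
-- ===== Notes on version B (the rewrite author's own statement) =====
-- stated objective: alternative
-- what changed: Replaced A's six separate passes over groups (two all() scans, an all-size check and three sum() comprehensions) with one loop that accumulates all three flags and three counters, computing each group's prefix slice and its 'D' or 'E' membership once.
import Mathlib
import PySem

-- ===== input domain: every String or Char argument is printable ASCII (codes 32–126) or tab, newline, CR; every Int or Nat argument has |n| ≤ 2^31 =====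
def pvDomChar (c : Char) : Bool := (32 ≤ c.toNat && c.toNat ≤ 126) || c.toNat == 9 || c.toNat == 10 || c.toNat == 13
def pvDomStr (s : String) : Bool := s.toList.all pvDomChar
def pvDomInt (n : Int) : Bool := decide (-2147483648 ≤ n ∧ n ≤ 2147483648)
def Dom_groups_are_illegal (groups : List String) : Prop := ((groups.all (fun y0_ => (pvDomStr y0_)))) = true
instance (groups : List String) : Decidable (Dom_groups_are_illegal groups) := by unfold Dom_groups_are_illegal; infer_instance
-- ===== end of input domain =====

-- B is a single pass over the groups accumulating all flags and counters at once
-- (objective: alternative decomposition; A makes up to six separate passes).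

-- ===== PORT A =====
def groups_are_illegal (groups : List String) : Bool :=
  if groups.all (fun group => "NAS".toList.any (fun c => (PySem.Str.slice group none (some 3)).toList.contains c)) then true
  else if groups.all (fun group => "NOF".toList.any (fun c => (PySem.Str.slice group none (some 3)).toList.contains c)) then true
  else if groups.all (fun g => PySem.Str.len g == 3) then
    let african_allowed_count : Int :=
      (groups.map (fun g => if ("DE".toList.any (fun c => g.toList.contains c)) && !(g.toList.contains 'F') then (1:Int) else 0)).sum
    if african_allowed_count < 3 then true
    else
      let asian_allowed_count : Int :=
        (groups.map (fun g => if ("DE".toList.any (fun c => g.toList.contains c)) && !(g.toList.contains 'A') then (1:Int) else 0)).sum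
      if asian_allowed_count < 2 then true
      else
        let african_or_asian_allowed_count : Int :=
          (groups.map (fun g => if ("DE".toList.any (fun c => g.toList.contains c)) && !("AF".toList.all (fun c => g.toList.contains c)) then (1:Int) else 0)).sum
        if african_or_asian_allowed_count < 5 then true else false
  else false

-- ===== PORT B =====
def giaStep (st : Bool × Bool × Bool × Int × Int × Int) (g : String) : Bool × Bool × Bool × Int × Int × Int :=
  let p := (PySem.Str.slice g none (some 3)).toList
  let l := g.toList
  let de := l.contains 'D' || l.contains 'E'
  ( st.1 && (p.contains 'N' || p.contains 'A' || p.contains 'S'),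
    st.2.1 && (p.contains 'N' || p.contains 'O' || p.contains 'F'),
    st.2.2.1 && (PySem.Str.len g == 3),
    st.2.2.2.1 + (if de && !(l.contains 'F') then (1:Int) else 0),
    st.2.2.2.2.1 + (if de && !(l.contains 'A') then (1:Int) else 0),
    st.2.2.2.2.2 + (if de && !(l.contains 'A' && l.contains 'F') then (1:Int) else 0) )

def groups_are_illegal_alt (groups : List String) : Bool :=
  let st := groups.foldl giaStep (true, true, true, 0, 0, 0)
  if st.1 then true
  else if st.2.1 then true
  else if st.2.2.1 then
    if st.2.2.2.1 < 3 then true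
    else if st.2.2.2.2.1 < 2 then true
    else if st.2.2.2.2.2 < 5 then true
    else false
  else false

-- ===== PRECONDITION & SPEC =====
def Spec_groups_are_illegal (groups : List String) (out : Bool) : Prop := out = groups_are_illegal_alt groups
instance (groups : List String) (out : Bool) : Decidable (Spec_groups_are_illegal groups out) := by unfold Spec_groups_are_illegal; infer_instance

-- ===== CLAIM (what is proved, stated in full; the proofs are below) =====
def Claim_equal_groups_are_illegal : Prop := ∀ (groups : List String), Dom_groups_are_illegal groups → Spec_groups_are_illegal groups (groups_are_illegal groups)

-- ===== LEMMAS AND PROOFS =====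

lemma gia_fold_char : ∀ (gs : List String) (b1 b2 b3 : Bool) (x y z : Int),
    gs.foldl giaStep (b1, b2, b3, x, y, z) =
      ( b1 && gs.all (fun group => "NAS".toList.any (fun c => (PySem.Str.slice group none (some 3)).toList.contains c)),
        b2 && gs.all (fun group => "NOF".toList.any (fun c => (PySem.Str.slice group none (some 3)).toList.contains c)),
        b3 && gs.all (fun g => PySem.Str.len g == 3),
        x + (gs.map (fun g => if ("DE".toList.any (fun c => g.toList.contains c)) && !(g.toList.contains 'F') then (1:Int) else 0)).sum,
        y + (gs.map (fun g => if ("DE".toList.any (fun c => g.toList.contains c)) && !(g.toList.contains 'A') then (1:Int) else 0)).sum,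
        z + (gs.map (fun g => if ("DE".toList.any (fun c => g.toList.contains c)) && !("AF".toList.all (fun c => g.toList.contains c)) then (1:Int) else 0)).sum )
  | [], b1, b2, b3, x, y, z => by simp
  | g :: gs, b1, b2, b3, x, y, z => by
      rw [List.foldl_cons, show giaStep (b1, b2, b3, x, y, z) g = _ from rfl, gia_fold_char gs]
      simp [giaStep, List.any, List.all, Bool.and_assoc, Bool.or_assoc, add_assoc]

theorem groups_are_illegal_spec : Claim_equal_groups_are_illegal := by
  intro groups _
  unfold Spec_groups_are_illegal groups_are_illegal groups_are_illegal_alt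
  rw [gia_fold_char]
  simp

-- ===== VERDICT (by name: the statement is the Claim_ definition above) =====
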